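-- pv_equiv track=rewrite | github.com/willtholke/phd | scripts/generate_all_instructions.py | classify_template
-- ===== SOURCE A (Python) =====
-- def classify_template(internal_name):
--     """Map internal_name to one of 11 template IDs."""
--     n = internal_name.lower()
--     if "text preference ranking" in n:
--         return "preference_ranking"
--     if "code generation review" in n or "code quality review" in n:
--         return "code_review"
--     if "prompt-response evaluation" in n or "instruction following" in n:
--         return "single_response_eval"
--     if any(x in n for x in ["safety labeling", "harmlessness boundary",
--                              "adversarial prompt", "constitutional ai"]):
--         return "safety_redteam"
--     if "content moderation" in n:
--         return "content_moderation"
--     if "search quality" in n: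
--         return "search_quality"
--     if "reasoning" in n:
--         return "reasoning_assessment"
--     if "multi-modal" in n:
--         return "multimodal_eval"
--     if "video understanding" in n:
--         return "video_annotation"
--     if "multilingual data" in n:
--         return "data_collection"
--     # Domain expert: legal, medical, science, humanities, domain expert
--     return "domain_expert_review"
-- ===== SOURCE B (Python) =====
-- # Exhaustive-scoring classifier: instead of a sequential first-match cascade,
-- # test every keyword, collect (priority, id) for each hit, and return the id
-- # of the minimal priority (argmin), i.e. the highest-priority category.
-- KEYWORD_RANKS = {
--     "text preference ranking": (0, "preference_ranking"),
--     "code generation review": (1, "code_review"),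
--     "code quality review": (1, "code_review"),
--     "prompt-response evaluation": (2, "single_response_eval"),
--     "instruction following": (2, "single_response_eval"),
--     "safety labeling": (3, "safety_redteam"),
--     "harmlessness boundary": (3, "safety_redteam"),
--     "adversarial prompt": (3, "safety_redteam"),
--     "constitutional ai": (3, "safety_redteam"),
--     "content moderation": (4, "content_moderation"),
--     "search quality": (5, "search_quality"),
--     "reasoning": (6, "reasoning_assessment"),
--     "multi-modal": (7, "multimodal_eval"),
--     "video understanding": (8, "video_annotation"),
--     "multilingual data": (9, "data_collection"),
-- }
--
-- def classify_template(internal_name):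
--     """Map internal_name to one of 11 template IDs."""
--     n = internal_name.lower()
--     matches = [rank for kw, rank in KEYWORD_RANKS.items() if kw in n]
--     if not matches:
--         return "domain_expert_review"
--     return min(matches, key=lambda t: t[0])[1]
-- ===== Notes on version B (the rewrite author's own statement) =====
-- stated objective: alternative
-- what changed: Instead of a sequential first-match if-cascade with early exit, B tests every keyword against the name, collects a (priority, id) pair for each hit, and returns the id of minimal priority (argmin over all matches); equality holds because the table's priorities are nondecreasing, so the minimum is the first match.
import Mathlib
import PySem

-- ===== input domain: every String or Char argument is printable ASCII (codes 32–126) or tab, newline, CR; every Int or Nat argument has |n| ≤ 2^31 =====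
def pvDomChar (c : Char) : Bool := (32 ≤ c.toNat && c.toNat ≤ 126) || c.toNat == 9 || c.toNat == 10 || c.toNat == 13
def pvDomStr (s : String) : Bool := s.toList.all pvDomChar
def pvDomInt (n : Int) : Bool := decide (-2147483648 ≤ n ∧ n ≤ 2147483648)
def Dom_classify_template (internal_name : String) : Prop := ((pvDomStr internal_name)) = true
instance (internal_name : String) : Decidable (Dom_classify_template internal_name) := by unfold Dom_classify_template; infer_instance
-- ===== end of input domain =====

-- B replaces A's sequential first-match cascade by exhaustive scoring: it tests every
-- keyword, collects (priority, id) for each hit, and returns the argmin priority's id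
-- (objective: alternative).

-- ===== PORT A =====
def classify_template (internal_name : String) : String :=
  let n := PySem.Str.lower internal_name
  if PySem.Str.isIn "text preference ranking" n then "preference_ranking"
  else if PySem.Str.isIn "code generation review" n || PySem.Str.isIn "code quality review" n then "code_review"
  else if PySem.Str.isIn "prompt-response evaluation" n || PySem.Str.isIn "instruction following" n then "single_response_eval"
  else if (["safety labeling", "harmlessness boundary", "adversarial prompt", "constitutional ai"].any (fun x => PySem.Str.isIn x n)) then "safety_redteam"
  else if PySem.Str.isIn "content moderation" n then "content_moderation"
  else if PySem.Str.isIn "search quality" n then "search_quality"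
  else if PySem.Str.isIn "reasoning" n then "reasoning_assessment"
  else if PySem.Str.isIn "multi-modal" n then "multimodal_eval"
  else if PySem.Str.isIn "video understanding" n then "video_annotation"
  else if PySem.Str.isIn "multilingual data" n then "data_collection"
  else "domain_expert_review"

-- ===== PORT B =====
def pvKeywordRanks : List (String × Int × String) :=
  [ ("text preference ranking", (0, "preference_ranking"))
  , ("code generation review", (1, "code_review"))
  , ("code quality review", (1, "code_review"))
  , ("prompt-response evaluation", (2, "single_response_eval"))
  , ("instruction following", (2, "single_response_eval"))
  , ("safety labeling", (3, "safety_redteam"))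
  , ("harmlessness boundary", (3, "safety_redteam"))
  , ("adversarial prompt", (3, "safety_redteam"))
  , ("constitutional ai", (3, "safety_redteam"))
  , ("content moderation", (4, "content_moderation"))
  , ("search quality", (5, "search_quality"))
  , ("reasoning", (6, "reasoning_assessment"))
  , ("multi-modal", (7, "multimodal_eval"))
  , ("video understanding", (8, "video_annotation"))
  , ("multilingual data", (9, "data_collection")) ]

def classify_template_alt (internal_name : String) : String :=
  let n := PySem.Str.lower internal_name
  -- [rank for kw, rank in KEYWORD_RANKS.items() if kw in n]
  let hits := pvKeywordRanks.filterMap (fun e => if PySem.Str.isIn e.1 n then some e.2 else none)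
  -- min(matches, key=lambda t: t[0])[1] : first element of minimal key, left-to-right scan
  match hits with
  | [] => "domain_expert_review"
  | m :: rest => (rest.foldl (fun acc y => if y.1 < acc.1 then y else acc) m).2

-- ===== PRECONDITION & SPEC =====
def Spec_classify_template (internal_name : String) (out : String) : Prop := out = classify_template_alt internal_name
instance (internal_name : String) (out : String) : Decidable (Spec_classify_template internal_name out) := by unfold Spec_classify_template; infer_instance

-- ===== CLAIM (what is proved, stated in full; the proofs are below) =====
def Claim_equal_classify_template : Prop := ∀ (internal_name : String), Dom_classify_template internal_name → Spec_classify_template internal_name (classify_template internal_name)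

-- ===== LEMMAS AND PROOFS =====

-- Python's min-with-key keeps the current element unless a strictly smaller key appears;
-- on a list whose keys are all ≥ the accumulator's, the accumulator survives.
theorem pv_foldl_pick_min (m : Int × String) (l : List (Int × String))
    (h : ∀ y ∈ l, m.1 ≤ y.1) :
    l.foldl (fun acc y => if y.1 < acc.1 then y else acc) m = m := by
  induction l with
  | nil => rfl
  | cons y l ih =>
    have hy : m.1 ≤ y.1 := h y (List.mem_cons_self ..)
    simp only [List.foldl_cons, if_neg (not_lt.mpr hy)]
    exact ih (fun z hz => h z (List.mem_cons_of_mem _ hz))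

-- first-match recursion over a rule table (proof-side characterisation of the cascade)
def pvFirst (n : String) : List (String × Int × String) → String
  | [] => "domain_expert_review"
  | e :: rest => if PySem.Str.isIn e.1 n then e.2.2 else pvFirst n rest

-- On a table with nondecreasing priorities, B's argmin over all matches is the first match.
theorem pv_alt_eq_first (n : String) (t : List (String × Int × String))
    (hsort : t.Pairwise (fun a b => a.2.1 ≤ b.2.1)) :
    (match t.filterMap (fun e => if PySem.Str.isIn e.1 n then some e.2 else none) with
     | [] => "domain_expert_review"
     | m :: rest => (rest.foldl (fun acc y => if y.1 < acc.1 then y else acc) m).2)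
    = pvFirst n t := by
  induction t with
  | nil => rfl
  | cons e t ih =>
    by_cases hc : PySem.Str.isIn e.1 n = true
    · have hrest : ∀ y ∈ t.filterMap (fun e => if PySem.Str.isIn e.1 n then some e.2 else none),
          e.2.1 ≤ y.1 := by
        intro y hy
        obtain ⟨z, hz, hzy⟩ := List.mem_filterMap.mp hy
        have hez : e.2.1 ≤ z.2.1 := (List.pairwise_cons.mp hsort).1 z hz
        by_cases h2 : PySem.Str.isIn z.1 n = true
        · simp only [h2, if_pos] at hzy
          cases hzy; exact hez
        · rw [if_neg h2] at hzy; cases hzy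
      simp only [List.filterMap_cons, pvFirst, hc, if_pos]
      rw [pv_foldl_pick_min e.2 _ hrest]
    · simp only [List.filterMap_cons, pvFirst, hc]
      simp only [Bool.false_eq_true, if_false]
      exact ih (List.pairwise_cons.mp hsort).2

-- ===== VERDICT (by name: the statement is the Claim_ definition above) =====
theorem classify_template_spec : Claim_equal_classify_template := by
  intro s _
  unfold Spec_classify_template classify_template classify_template_alt
  rw [pv_alt_eq_first _ _ (by decide)]
  simp only [pvKeywordRanks, pvFirst, List.any_cons, List.any_nil, Bool.or_false]
  generalize PySem.Str.isIn "text preference ranking" (PySem.Str.lower s) = b1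
  generalize PySem.Str.isIn "code generation review" (PySem.Str.lower s) = b2
  generalize PySem.Str.isIn "code quality review" (PySem.Str.lower s) = b3
  generalize PySem.Str.isIn "prompt-response evaluation" (PySem.Str.lower s) = b4
  generalize PySem.Str.isIn "instruction following" (PySem.Str.lower s) = b5
  generalize PySem.Str.isIn "safety labeling" (PySem.Str.lower s) = b6
  generalize PySem.Str.isIn "harmlessness boundary" (PySem.Str.lower s) = b7
  generalize PySem.Str.isIn "adversarial prompt" (PySem.Str.lower s) = b8
  generalize PySem.Str.isIn "constitutional ai" (PySem.Str.lower s) = b9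
  generalize PySem.Str.isIn "content moderation" (PySem.Str.lower s) = b10
  generalize PySem.Str.isIn "search quality" (PySem.Str.lower s) = b11
  generalize PySem.Str.isIn "reasoning" (PySem.Str.lower s) = b12
  generalize PySem.Str.isIn "multi-modal" (PySem.Str.lower s) = b13
  generalize PySem.Str.isIn "video understanding" (PySem.Str.lower s) = b14
  generalize PySem.Str.isIn "multilingual data" (PySem.Str.lower s) = b15
  revert b1 b2 b3 b4 b5 b6 b7 b8 b9 b10 b11 b12 b13 b14 b15
  decide
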